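-- pv_equiv track=rewrite | github.com/aabarbosa/Python | .py/119e.py | eh_vencedor_linea
-- ===== SOURCE A (Python) =====
-- def eh_vencedor_linea(tabuleiro):
-- 	j = tabuleiro[0]
-- 	for i in range(len(tabuleiro)):
-- 		if j >= len(tabuleiro) or j < 0:
-- 			return False
-- 		if j == 0:
-- 			return True
-- 		j = tabuleiro[j]
-- 	return False
-- ===== SOURCE B (Python) =====
-- def eh_vencedor_linea(tabuleiro):
--     # Backward fixpoint: compute the set of indices whose pointer chain reaches 0
--     # (stopping as soon as the set is stable), then test the first move.
--     # tabuleiro[0] is read first (IndexError on []).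
--     start = tabuleiro[0]
--     n = len(tabuleiro)
--     win = {0}
--     for _ in range(n):
--         new = {i for i in range(n)
--                if i == 0 or (0 <= tabuleiro[i] < n and tabuleiro[i] in win)}
--         if new == win:
--             break
--         win = new
--     return 0 <= start < n and start in win
-- ===== Notes on version B (the rewrite author's own statement) =====
-- stated objective: alternative
-- what changed: replaces A's forward pointer chase bounded by a len-step counter with a backward fixpoint computation: iterate 'win = indices that are 0 or point in-bounds into win' until stable (at most n passes) and test whether the first move lands in the winning set
import Mathlib
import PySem

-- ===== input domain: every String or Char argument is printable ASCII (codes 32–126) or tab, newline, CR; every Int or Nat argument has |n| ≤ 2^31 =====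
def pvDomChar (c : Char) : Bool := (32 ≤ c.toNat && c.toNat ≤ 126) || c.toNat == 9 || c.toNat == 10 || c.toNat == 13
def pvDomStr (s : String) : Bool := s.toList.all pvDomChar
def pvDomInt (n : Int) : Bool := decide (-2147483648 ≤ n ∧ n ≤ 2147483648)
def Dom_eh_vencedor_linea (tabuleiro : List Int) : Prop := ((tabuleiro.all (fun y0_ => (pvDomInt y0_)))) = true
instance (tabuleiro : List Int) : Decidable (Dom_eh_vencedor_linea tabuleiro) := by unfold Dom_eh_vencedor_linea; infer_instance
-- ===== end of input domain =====

-- B replaces A's forward, counter-bounded pointer chase by a backward fixpoint: iterate n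
-- times 'win = {i : i = 0 or t[i] points in-bounds into win}' and test the first move
-- (return value only; neither version mutates its argument).

-- ===== PORT A =====
-- the for-loop of A: n = remaining iterations of `for i in range(len(tabuleiro))`, j the chased index
def ehLoopA (t : List Int) : Nat → Int → Bool
  | 0, _ => false
  | n + 1, j =>
    if (t.length : Int) ≤ j ∨ j < 0 then false
    else if j = 0 then true
    else ehLoopA t n (PySem.List.pyGetD t j 0)   -- guard above makes t[j] in range

def eh_vencedor_linea (tabuleiro : List Int) : Bool :=
  match PySem.List.pyGet? tabuleiro 0 with      -- j = tabuleiro[0] (IndexError on [])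
  | none => false
  | some j => ehLoopA tabuleiro tabuleiro.length j

-- ===== PORT B =====
-- one pass of B's loop body: the set comprehension over range(n)
def winStep (t : List Int) (w : PySem.Set Int) : PySem.Set Int :=
  PySem.Set.ofList ((PySem.List.pyRange 0 (t.length : Int) 1).filter
    (fun i => i == 0 ||
      (decide (0 ≤ PySem.List.pyGetD t i 0) &&
       decide (PySem.List.pyGetD t i 0 < (t.length : Int)) &&
       PySem.Set.contains w (PySem.List.pyGetD t i 0))))   -- i ∈ range(n), so t[i] is in range

-- `win = {0}` then `for _ in range(n): new = winStep win; if new == win: break; win = new`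
def winLoop (t : List Int) : Nat → PySem.Set Int → PySem.Set Int
  | 0, w => w
  | k + 1, w =>
    let new := winStep t w
    if PySem.Set.equal new w then w else winLoop t k new

def eh_vencedor_linea_alt (tabuleiro : List Int) : Bool :=
  match PySem.List.pyGet? tabuleiro 0 with      -- start = tabuleiro[0] (IndexError on [])
  | none => false
  | some start =>
      decide (0 ≤ start) && decide (start < (tabuleiro.length : Int)) &&
      PySem.Set.contains
        (winLoop tabuleiro tabuleiro.length (PySem.Set.add PySem.Set.empty 0)) start

-- ===== PRECONDITION & SPEC =====
-- Pre_ excludes only the empty list, on which both Pythons raise IndexError reading the first element.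
def Pre_eh_vencedor_linea (tabuleiro : List Int) : Prop := tabuleiro ≠ []
instance (tabuleiro : List Int) : Decidable (Pre_eh_vencedor_linea tabuleiro) := by
  unfold Pre_eh_vencedor_linea; infer_instance
def pvWitness_eh_vencedor_linea : List Int := [1, 2, 0]

def Spec_eh_vencedor_linea (tabuleiro : List Int) (out : Bool) : Prop := out = eh_vencedor_linea_alt tabuleiro
instance (tabuleiro : List Int) (out : Bool) : Decidable (Spec_eh_vencedor_linea tabuleiro out) := by unfold Spec_eh_vencedor_linea; infer_instance

-- ===== CLAIM (what is proved, stated in full; the proofs are below) =====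
def Claim_equal_eh_vencedor_linea : Prop := ∀ (tabuleiro : List Int), Dom_eh_vencedor_linea tabuleiro → Pre_eh_vencedor_linea tabuleiro → Spec_eh_vencedor_linea tabuleiro (eh_vencedor_linea tabuleiro)

-- ===== LEMMAS AND PROOFS =====

-- one step of the pointer chase, on Option: `none` once the chain has left the board or
-- already reached 0 at the previous position
def orbStep (t : List Int) : Option Int → Option Int
  | some x => if 0 ≤ x ∧ x < (t.length : Int) ∧ x ≠ 0 then some (PySem.List.pyGetD t x 0) else none
  | none => none

-- the orbit of the pointer chase from j (position 0 itself still shows the 0)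
def orb (t : List Int) (j : Int) : Nat → Option Int
  | 0 => some j
  | n + 1 => orbStep t (orb t j n)

theorem orb_shift (t : List Int) (j : Int)
    (h : 0 ≤ j ∧ j < (t.length : Int) ∧ j ≠ 0) (k : Nat) :
    orb t j (k + 1) = orb t (PySem.List.pyGetD t j 0) k := by
  induction k with
  | zero => simp [orb, orbStep, h]
  | succ k ih => rw [show orb t j (k + 1 + 1) = orbStep t (orb t j (k + 1)) from rfl, ih]; rfl

theorem orb_pred {t : List Int} {j y : Int} {n : Nat}
    (h : orb t j (n + 1) = some y) :
    ∃ x, orb t j n = some x ∧ (0 ≤ x ∧ x < (t.length : Int) ∧ x ≠ 0) ∧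
      y = PySem.List.pyGetD t x 0 := by
  rw [show orb t j (n + 1) = orbStep t (orb t j n) from rfl] at h
  cases hx : orb t j n with
  | none => rw [hx] at h; exact absurd h (by simp [orbStep])
  | some x =>
    rw [hx] at h
    by_cases hc : 0 ≤ x ∧ x < (t.length : Int) ∧ x ≠ 0
    · refine ⟨x, rfl, hc, ?_⟩
      simp [orbStep, hc] at h; omega
    · simp [orbStep, hc] at h

theorem orb_prefix {t : List Int} {j : Int} :
    ∀ {k : Nat} {y : Int}, orb t j k = some y →
      ∀ i < k, ∃ x, orb t j i = some x ∧ 0 ≤ x ∧ x < (t.length : Int) ∧ x ≠ 0 := by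
  intro k
  induction k with
  | zero => intro y _ i hi; omega
  | succ k ih =>
    intro y h i hi
    obtain ⟨x, hx, hc, -⟩ := orb_pred h
    rcases Nat.lt_succ_iff_lt_or_eq.mp hi with hlt | rfl
    · exact ih hx i hlt
    · exact ⟨x, hx, hc⟩

theorem orb_periodic {t : List Int} {j : Int} {a b : Nat}
    (h : orb t j a = orb t j b) (m : Nat) :
    orb t j (a + m) = orb t j (b + m) := by
  induction m with
  | zero => simpa using h
  | succ m ih =>
    rw [show a + (m + 1) = (a + m) + 1 from rfl, show b + (m + 1) = (b + m) + 1 from rfl]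
    rw [show orb t j ((a + m) + 1) = orbStep t (orb t j (a + m)) from rfl, ih]; rfl

theorem ehLoopA_iff (t : List Int) (hlen : 0 < t.length) (n : Nat) (j : Int) :
    ehLoopA t n j = true ↔ ∃ k < n, orb t j k = some 0 := by
  induction n generalizing j with
  | zero => simp [ehLoopA]
  | succ n ih =>
    by_cases hout : (t.length : Int) ≤ j ∨ j < 0
    · simp only [ehLoopA, if_pos hout]
      constructor
      · intro h; exact absurd h (by simp)
      · rintro ⟨k, hk, hor⟩
        rcases Nat.eq_zero_or_pos k with rfl | hkpos
        · simp only [orb, Option.some.injEq] at hor; omega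
        · obtain ⟨x, hx, hc⟩ := orb_prefix hor 0 hkpos
          simp only [orb, Option.some.injEq] at hx; omega
    · by_cases hj0 : j = 0
      · subst hj0
        have hA : ehLoopA t (n + 1) 0 = true := by
          have hne : t ≠ [] := List.ne_nil_of_length_pos hlen
          simp [ehLoopA, hne]
        rw [hA]
        simp only [true_iff]
        exact ⟨0, Nat.succ_pos n, rfl⟩
      · simp only [ehLoopA, if_neg hout, if_neg hj0, ih]
        constructor
        · rintro ⟨k, hk, hor⟩
          refine ⟨k + 1, by omega, ?_⟩
          rw [orb_shift t j (by omega) k]; exact hor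
        · rintro ⟨k, hk, hor⟩
          rcases Nat.eq_zero_or_pos k with rfl | hkpos
          · simp only [orb, Option.some.injEq] at hor; omega
          · obtain ⟨k', rfl⟩ : ∃ k', k = k' + 1 := ⟨k - 1, by omega⟩
            rw [orb_shift t j (by omega) k'] at hor
            exact ⟨k', by omega, hor⟩

-- proof-side helper: the fixpoint iteration without the early exit
def winIterFrom (t : List Int) (w : PySem.Set Int) : Nat → PySem.Set Int
  | 0 => w
  | k + 1 => winStep t (winIterFrom t w k)

-- membership in one comprehension pass
theorem mem_winStep {t : List Int} {w : PySem.Set Int} {x : Int} :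
    x ∈ winStep t w ↔ 0 ≤ x ∧ x < (t.length : Int) ∧
      (x = 0 ∨ (0 ≤ PySem.List.pyGetD t x 0 ∧ PySem.List.pyGetD t x 0 < (t.length : Int) ∧
                PySem.List.pyGetD t x 0 ∈ w)) := by
  unfold winStep
  rw [PySem.Set.mem_ofList, List.mem_filter]
  simp only [PySem.List.mem_pyRange_one, Bool.or_eq_true, beq_iff_eq, Bool.and_eq_true,
    decide_eq_true_eq, PySem.Set.contains_iff]
  tauto

-- the step map only looks at membership in w
theorem winStep_congr {t : List Int} {w w' : PySem.Set Int}
    (h : ∀ y : Int, y ∈ w ↔ y ∈ w') (x : Int) :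
    x ∈ winStep t w ↔ x ∈ winStep t w' := by
  rw [mem_winStep, mem_winStep]
  simp only [h]

-- once winStep fixes w (as a set), iterating does not change membership
theorem fix_iter {t : List Int} {w : PySem.Set Int}
    (hfix : ∀ y : Int, y ∈ winStep t w ↔ y ∈ w) :
    ∀ (k : Nat) (y : Int), y ∈ winIterFrom t w k ↔ y ∈ w := by
  intro k
  induction k with
  | zero => intro y; exact Iff.rfl
  | succ k ih =>
    intro y
    rw [show winIterFrom t w (k + 1) = winStep t (winIterFrom t w k) from rfl]
    exact (winStep_congr ih y).trans (hfix y)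

-- the two iteration shapes coincide
theorem iterFrom_comm (t : List Int) (w : PySem.Set Int) (k : Nat) :
    winIterFrom t (winStep t w) k = winStep t (winIterFrom t w k) := by
  induction k with
  | zero => rfl
  | succ k ih =>
    rw [show winIterFrom t (winStep t w) (k + 1) = winStep t (winIterFrom t (winStep t w) k) from rfl, ih]
    rfl

-- the early-exit loop has the same members as the plain k-fold iteration
theorem winLoop_mem (t : List Int) :
    ∀ (k : Nat) (w : PySem.Set Int) (x : Int), x ∈ winLoop t k w ↔ x ∈ winIterFrom t w k := by
  intro k
  induction k with
  | zero => intro w x; exact Iff.rfl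
  | succ k ih =>
    intro w x
    rw [show winLoop t (k + 1) w =
      (if PySem.Set.equal (winStep t w) w then w else winLoop t k (winStep t w)) from rfl]
    by_cases hfix : PySem.Set.equal (winStep t w) w = true
    · rw [if_pos hfix]
      have hfix' := (PySem.Set.equal_iff _ _).mp hfix
      rw [show winIterFrom t w (k + 1) = winStep t (winIterFrom t w k) from rfl]
      exact ((winStep_congr (fix_iter hfix' k) x).trans (hfix' x)).symm
    · rw [if_neg hfix, ih, iterFrom_comm]
      exact Iff.rfl

-- membership after k passes = "in bounds and reaches 0 in at most k steps"
theorem mem_winIter (t : List Int) (hlen : 0 < t.length) (k : Nat) (x : Int) :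
    x ∈ winIterFrom t (PySem.Set.add PySem.Set.empty 0) k ↔ 0 ≤ x ∧ x < (t.length : Int) ∧ ∃ m ≤ k, orb t x m = some 0 := by
  induction k generalizing x with
  | zero =>
    simp only [winIterFrom, PySem.Set.mem_add, PySem.Set.empty, List.not_mem_nil, false_or]
    constructor
    · rintro rfl
      exact ⟨le_refl 0, by exact_mod_cast hlen, 0, le_refl 0, rfl⟩
    · rintro ⟨-, -, m, hm, hor⟩
      interval_cases m
      simpa [orb] using hor
  | succ k ih =>
    rw [show winIterFrom t (PySem.Set.add PySem.Set.empty 0) (k + 1) =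
      winStep t (winIterFrom t (PySem.Set.add PySem.Set.empty 0) k) from rfl, mem_winStep]
    constructor
    · rintro ⟨hx0, hxn, h0 | ⟨hy0, hyn, hyw⟩⟩
      · exact ⟨hx0, hxn, 0, Nat.zero_le _, by simp [orb, h0]⟩
      · obtain ⟨-, -, m, hm, hor⟩ := (ih _).mp hyw
        by_cases hx : x = 0
        · exact ⟨hx0, hxn, 0, Nat.zero_le _, by simp [orb, hx]⟩
        · refine ⟨hx0, hxn, m + 1, by omega, ?_⟩
          rw [orb_shift t x ⟨hx0, hxn, hx⟩ m]; exact hor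
    · rintro ⟨hx0, hxn, m, hm, hor⟩
      by_cases hx : x = 0
      · exact ⟨hx0, hxn, Or.inl hx⟩
      · refine ⟨hx0, hxn, Or.inr ?_⟩
        obtain ⟨m', rfl⟩ : ∃ m', m = m' + 1 := by
          rcases Nat.eq_zero_or_pos m with rfl | hpos
          · simp only [orb, Option.some.injEq] at hor; omega
          · exact ⟨m - 1, by omega⟩
        rw [orb_shift t x ⟨hx0, hxn, hx⟩ m'] at hor
        have hbounds : 0 ≤ PySem.List.pyGetD t x 0 ∧ PySem.List.pyGetD t x 0 < (t.length : Int) := by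
          rcases Nat.eq_zero_or_pos m' with rfl | hpos
          · simp only [orb, Option.some.injEq] at hor
            constructor <;> omega
          · obtain ⟨z, hz, hcz⟩ := orb_prefix hor 0 hpos
            simp only [orb, Option.some.injEq] at hz
            constructor <;> omega
        exact ⟨hbounds.1, hbounds.2, (ih _).mpr ⟨hbounds.1, hbounds.2, m', by omega, hor⟩⟩

theorem find_lt_len {t : List Int} {j : Int} (hlen : 0 < t.length)
    (hex : ∃ k, orb t j k = some 0) :
    Nat.find hex < t.length := by
  have hor : orb t j (Nat.find hex) = some 0 := Nat.find_spec hex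
  have hdist : ∀ i i', i < i' → i' < Nat.find hex → orb t j i ≠ orb t j i' := by
    intro i i' hlt hub heq
    have hper := orb_periodic heq (Nat.find hex - i')
    rw [Nat.add_sub_cancel' (le_of_lt hub)] at hper
    have h0 : orb t j (i + (Nat.find hex - i')) = some 0 := by rw [hper]; exact hor
    exact absurd h0 (Nat.find_min hex (by omega))
  -- pigeonhole: the first Nat.find hex orbit values are distinct members of Ioo 0 len
  set k₀ := Nat.find hex with hk₀
  by_contra hge
  have hmaps : ∀ i ∈ Finset.range k₀, (orb t j i).getD 37 ∈ Finset.Ioo (0 : Int) (t.length : Int) := by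
    intro i hi
    obtain ⟨x, hx, hcx⟩ := orb_prefix hor i (Finset.mem_range.mp hi)
    rw [hx]; simp only [Option.getD_some, Finset.mem_Ioo]; omega
  have hinj : Set.InjOn (fun i => (orb t j i).getD 37) (Finset.range k₀) := by
    intro a ha b hb hab
    simp only [Finset.coe_range, Set.mem_Iio] at ha hb
    by_contra hne
    obtain ⟨xa, hxa, -⟩ := orb_prefix hor a ha
    obtain ⟨xb, hxb, -⟩ := orb_prefix hor b hb
    simp only [hxa, hxb, Option.getD_some] at hab
    rcases Nat.lt_or_ge a b with h | h
    · exact hdist a b h hb (by rw [hxa, hxb, hab])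
    · exact hdist b a (by omega) ha (by rw [hxa, hxb, hab])
  have hcard := Finset.card_le_card_of_injOn _ hmaps hinj
  rw [Finset.card_range, Int.card_Ioo] at hcard
  omega

-- A's loop and B's fixpoint test agree
theorem loops_eq (t : List Int) (hlen : 0 < t.length) (j : Int) :
    ehLoopA t t.length j =
      (decide (0 ≤ j) && decide (j < (t.length : Int)) &&
       PySem.Set.contains (winLoop t t.length (PySem.Set.add PySem.Set.empty 0)) j) := by
  by_cases hex : ∃ k, orb t j k = some 0
  · have hA : ehLoopA t t.length j = true :=
      (ehLoopA_iff t hlen t.length j).mpr ⟨Nat.find hex, find_lt_len hlen hex, Nat.find_spec hex⟩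
    have hbounds : 0 ≤ j ∧ j < (t.length : Int) := by
      have hor := Nat.find_spec hex
      rcases Nat.eq_zero_or_pos (Nat.find hex) with h0 | hpos
      · rw [h0] at hor; simp only [orb, Option.some.injEq] at hor
        constructor <;> omega
      · obtain ⟨x, hx, hc⟩ := orb_prefix hor 0 hpos
        simp only [orb, Option.some.injEq] at hx
        constructor <;> omega
    have hB : PySem.Set.contains (winLoop t t.length (PySem.Set.add PySem.Set.empty 0)) j = true := by
      rw [PySem.Set.contains_iff, winLoop_mem, mem_winIter t hlen]
      exact ⟨hbounds.1, hbounds.2, Nat.find hex, le_of_lt (find_lt_len hlen hex), Nat.find_spec hex⟩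
    rw [hA, hB]
    simp [hbounds.1, hbounds.2]
  · have hA : ehLoopA t t.length j = false := by
      cases h : ehLoopA t t.length j
      · rfl
      · obtain ⟨k, -, hk⟩ := (ehLoopA_iff t hlen t.length j).mp h
        exact absurd ⟨k, hk⟩ hex
    have hB : PySem.Set.contains (winLoop t t.length (PySem.Set.add PySem.Set.empty 0)) j = false := by
      cases h : PySem.Set.contains (winLoop t t.length (PySem.Set.add PySem.Set.empty 0)) j
      · rfl
      · rw [PySem.Set.contains_iff, winLoop_mem, mem_winIter t hlen] at h
        obtain ⟨-, -, m, -, hm⟩ := h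
        exact absurd ⟨m, hm⟩ hex
    rw [hA, hB]
    simp

-- ===== VERDICT (by name: the statement is the Claim_ definition above) =====
theorem eh_vencedor_linea_spec : Claim_equal_eh_vencedor_linea := by
  intro t _ hpre
  unfold Spec_eh_vencedor_linea eh_vencedor_linea eh_vencedor_linea_alt
  cases t with
  | nil => exact absurd rfl hpre
  | cons h tl =>
    rw [PySem.List.pyGet?_zero_cons]
    exact loops_eq (h :: tl) (by simp) h
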